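-- pv_equiv track=rewrite | github.com/clifford-cheng/WealthPipeline | wealth_leads/territory.py | _hq_blob_trim_trailing_prose
-- ===== SOURCE A (Python) =====
-- def _hq_blob_trim_trailing_prose(blob: str) -> str:
--     """Drop SEC narrative often glued after the address (``..., which is where our ...``)."""
--     t = (blob or "").strip()
--     if not t:
--         return ""
--     low = t.lower()
--     for marker in (
--         ", which",
--         ", where",
--         "; which",
--         ", and is",
--         ", and our",
--     ):
--         i = low.find(marker)
--         if i > 16:
--             t = t[:i].strip().rstrip(",;")
--             low = t.lower()
--     return t
-- ===== SOURCE B (Python) =====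
-- def _hq_blob_trim_trailing_prose(blob: str) -> str:
--     """Drop SEC narrative glued after the address: track a cut index instead of
--     rebuilding/re-lowercasing the string on every trim; one final slice."""
--     t = (blob or "").strip()
--     if not t:
--         return ""
--     low = t.lower()
--     n = len(t)
--     for marker in (
--         ", which",
--         ", where",
--         "; which",
--         ", and is",
--         ", and our",
--     ):
--         i = low.find(marker, 0, n)
--         if i > 16:
--             n = i
--             while n > 0 and t[n - 1].isspace():
--                 n -= 1
--             while n > 0 and t[n - 1] in ",;":
--                 n -= 1
--     return t[:n]
-- ===== Notes on version B (the rewrite author's own statement) =====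
-- stated objective: alternative
-- what changed: B keeps a single cut index into the once-stripped, once-lowercased string, using a bounded find low.find(marker, 0, n) and in-place index decrements for the strip/rstrip steps, and slices once at the end, instead of A's rebuilding, re-stripping and re-lowercasing the string on every marker hit.
import Mathlib
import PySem

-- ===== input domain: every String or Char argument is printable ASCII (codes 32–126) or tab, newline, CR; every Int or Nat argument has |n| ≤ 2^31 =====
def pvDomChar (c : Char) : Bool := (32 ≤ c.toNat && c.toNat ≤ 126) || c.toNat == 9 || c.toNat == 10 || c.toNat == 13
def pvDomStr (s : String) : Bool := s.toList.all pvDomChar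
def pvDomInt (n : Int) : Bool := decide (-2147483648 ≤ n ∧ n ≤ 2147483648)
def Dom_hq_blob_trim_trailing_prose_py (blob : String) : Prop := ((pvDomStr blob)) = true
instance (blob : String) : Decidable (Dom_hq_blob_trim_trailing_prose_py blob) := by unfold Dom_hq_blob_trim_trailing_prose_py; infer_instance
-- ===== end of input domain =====

-- B keeps a cut index into the once-stripped, once-lowercased string (bounded find + index
-- arithmetic, one final slice) instead of A's re-slice/re-strip/re-lowercase per marker hit;
-- objective: alternative (same values, no measured speed claim).

-- ===== PORT A =====
-- the marker tuple, shared verbatim by both ports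
def pvMarkers : List (List Char) :=
  [", which".toList, ", where".toList, "; which".toList, ", and is".toList, ", and our".toList]

-- exact hand port of Python's `s.rstrip(",;")` (PySem has no rstrip-with-chars):
-- drop trailing ',' and ';' characters
def pvRstripPunct (s : List Char) : List Char :=
  (s.reverse.dropWhile (fun c => c == ',' || c == ';')).reverse

-- one iteration of A's `for marker in (...)` loop over the state (t, low)
def pvAStep (st : List Char × List Char) (m : List Char) : List Char × List Char :=
  let i := PySem.Chars.find st.2 m
  if 16 < i then
    let t := pvRstripPunct (PySem.Chars.strip (PySem.Chars.slice st.1 none (some i)))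
    (t, PySem.Chars.lower t)
  else st

def hq_blob_trim_trailing_prose_py (blob : String) : String :=
  -- `(blob or "").strip()` strips "" when blob is empty, blob otherwise: same as blob.strip()
  let t := PySem.Chars.strip blob.toList
  if t = [] then ""
  else String.ofList (pvMarkers.foldl pvAStep (t, PySem.Chars.lower t)).1

-- ===== PORT B =====
-- `while n > 0 and p(t[n-1]): n -= 1` (the index n-1 is always in range when used)
def pvDropBack (t : List Char) (p : Char → Bool) : Nat → Nat
  | 0 => 0
  | n+1 => if p (t.getD n ' ') then pvDropBack t p n else n + 1

-- one iteration of B's loop over the cut index n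
def pvBStep (t low : List Char) (n : Nat) (m : List Char) : Nat :=
  let i := PySem.Chars.findFrom low m 0 (some (n : Int))   -- low.find(marker, 0, n)
  if 16 < i then
    pvDropBack t (fun c => c == ',' || c == ';')
      (pvDropBack t (fun c => PySem.Chars.isspace c) i.toNat)
  else n

def hq_blob_trim_trailing_prose_py_alt (blob : String) : String :=
  let t := PySem.Chars.strip blob.toList
  if t = [] then ""
  else
    let low := PySem.Chars.lower t
    let n := pvMarkers.foldl (pvBStep t low) t.length
    String.ofList (PySem.Chars.slice t none (some (n : Int)))   -- t[:n]

-- ===== PRECONDITION & SPEC =====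
def Spec_hq_blob_trim_trailing_prose_py (blob : String) (out : String) : Prop := out = hq_blob_trim_trailing_prose_py_alt blob
instance (blob : String) (out : String) : Decidable (Spec_hq_blob_trim_trailing_prose_py blob out) := by unfold Spec_hq_blob_trim_trailing_prose_py; infer_instance

-- ===== CLAIM (what is proved, stated in full; the proofs are below) =====
def Claim_equal_hq_blob_trim_trailing_prose_py : Prop := ∀ (blob : String), Dom_hq_blob_trim_trailing_prose_py blob → Spec_hq_blob_trim_trailing_prose_py blob (hq_blob_trim_trailing_prose_py blob)

-- ===== LEMMAS AND PROOFS =====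

-- lowercasing commutes with taking a prefix
theorem pvLower_take (t : List Char) (n : Nat) :
    PySem.Chars.lower (t.take n) = (PySem.Chars.lower t).take n := by
  simp [PySem.Chars.lower, List.map_take]

-- `s.find(sub, 0, n)` is `find` on the prefix `s[:n]`
theorem pvFindFrom_take (s sub : List Char) (n : Nat) (hn : n ≤ s.length) :
    PySem.Chars.findFrom s sub 0 (some (n : Int)) = PySem.Chars.find (s.take n) sub := by
  have h1 : ¬ ((s.length : Int) < (n : Int)) := by exact_mod_cast not_lt.2 hn
  simp only [PySem.Chars.findFrom, h1, if_false]
  split_ifs with ha hb hc <;> first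
    | omega
    | simp_all [Int.toNat_natCast]

-- reverse/dropWhile/reverse on a prefix is `take` of the pvDropBack index
theorem pvDropBack_take (t : List Char) (p : Char → Bool) (n : Nat) (hn : n ≤ t.length) :
    ((t.take n).reverse.dropWhile p).reverse = t.take (pvDropBack t p n)
      ∧ pvDropBack t p n ≤ n := by
  induction n with
  | zero => simp [pvDropBack]
  | succ k ih =>
    have hk : k < t.length := hn
    have htake : t.take (k+1) = t.take k ++ [t[k]] := by
      rw [List.take_add_one, List.getElem?_eq_getElem hk]; rfl
    obtain ⟨ih1, ih2⟩ := ih (le_of_lt hk)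
    have hgd : t[k]?.getD ' ' = t[k] := by
      simp [List.getElem?_eq_getElem hk]
    by_cases hp : p t[k]
    · have hstep : pvDropBack t p (k+1) = pvDropBack t p k := by
        simp [pvDropBack, hgd, hp]
      rw [hstep, htake]
      refine ⟨?_, le_trans ih2 (Nat.le_succ k)⟩
      rw [List.reverse_append]
      simpa [hp] using ih1
    · have hstep : pvDropBack t p (k+1) = k + 1 := by
        simp [pvDropBack, hgd, hp]
      rw [hstep, htake]
      refine ⟨?_, le_rfl⟩
      rw [List.reverse_append]
      simp only [List.reverse_singleton, List.singleton_append, List.dropWhile_cons, hp,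
        if_false, Bool.false_eq_true]
      simp [← htake]

-- the head of a stripped string is not whitespace
theorem pvStrip_head (s : List Char) (c : Char) (h : (PySem.Chars.strip s).head? = some c) :
    PySem.Chars.isspace c = false := by
  unfold PySem.Chars.strip PySem.Chars.rstrip at h
  set u := PySem.Chars.lstrip s with hu
  have hpre : (List.dropWhile PySem.Chars.isspace u.reverse).reverse <+: u := by
    have h2 : (List.dropWhile PySem.Chars.isspace u.reverse).reverse <+: u.reverse.reverse :=
      List.reverse_prefix.mpr (List.dropWhile_suffix _)
    rwa [List.reverse_reverse] at h2
  obtain ⟨r, hr⟩ := hpre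
  have hcu : u.head? = some c := by
    rw [← hr, List.head?_append, h]; rfl
  have := List.head?_dropWhile_not PySem.Chars.isspace s
  rw [hu] at hcu
  unfold PySem.Chars.lstrip at hcu
  rw [hcu] at this
  simpa using this

-- one loop iteration preserves the relation "A's state is (t0[:n], lower t0[:n])"
theorem pvStep_eq (t0 : List Char)
    (hns : ∀ c, t0.head? = some c → PySem.Chars.isspace c = false)
    (m : List Char) (n : Nat) (hn : n ≤ t0.length) :
    pvAStep (t0.take n, PySem.Chars.lower (t0.take n)) m
        = (t0.take (pvBStep t0 (PySem.Chars.lower t0) n m),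
           PySem.Chars.lower (t0.take (pvBStep t0 (PySem.Chars.lower t0) n m)))
      ∧ pvBStep t0 (PySem.Chars.lower t0) n m ≤ n := by
  have hlen : (PySem.Chars.lower t0).length = t0.length := by
    simp [PySem.Chars.lower]
  have hfind : PySem.Chars.findFrom (PySem.Chars.lower t0) m 0 (some (n : Int))
      = PySem.Chars.find (PySem.Chars.lower (t0.take n)) m := by
    rw [pvFindFrom_take _ _ _ (by rw [hlen]; exact hn), pvLower_take]
  simp only [pvAStep, pvBStep, hfind]
  by_cases hI : 16 < PySem.Chars.find (PySem.Chars.lower (t0.take n)) m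
  · set i := PySem.Chars.find (PySem.Chars.lower (t0.take n)) m with hi
    have hile : i ≤ (n : Int) := by
      have h1 := PySem.Chars.find_le_length (PySem.Chars.lower (t0.take n)) m
      have h2 : (PySem.Chars.lower (t0.take n)).length = n := by
        simp [PySem.Chars.lower, List.length_take]; omega
      rw [h2] at h1; exact h1
    have hitn : i.toNat ≤ n := by omega
    have h17 : 17 ≤ i.toNat := by omega
    rw [if_pos hI, if_pos hI]
    -- the slice t[:i] of the prefix t0[:n] is t0[:i]
    have hslice : PySem.Chars.slice (t0.take n) none (some i) = t0.take i.toNat := by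
      rw [PySem.Chars.slice_eq_listSlice, PySem.List.slice_to _ (by omega), List.take_take]
      congr 1; omega
    -- strip = rstrip on a nonempty prefix of t0 (no leading whitespace)
    have hstrip : PySem.Chars.strip (t0.take i.toNat) = PySem.Chars.rstrip (t0.take i.toNat) := by
      cases t0 with
      | nil => simp at hn; omega
      | cons c rest =>
        unfold PySem.Chars.strip PySem.Chars.lstrip
        have hc : PySem.Chars.isspace c = false := hns c rfl
        have : i.toNat = (i.toNat - 1) + 1 := by omega
        rw [this, List.take_succ_cons, List.dropWhile_cons, hc]
        simp
    have hrs := pvDropBack_take t0 (fun c => PySem.Chars.isspace c) i.toNat (le_trans hitn hn)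
    have hrp := pvDropBack_take t0 (fun c => c == ',' || c == ';')
        (pvDropBack t0 (fun c => PySem.Chars.isspace c) i.toNat)
        (le_trans hrs.2 (le_trans hitn hn))
    constructor
    · have ht' : pvRstripPunct (PySem.Chars.strip (PySem.Chars.slice (t0.take n) none (some i)))
          = t0.take (pvDropBack t0 (fun c => c == ',' || c == ';')
              (pvDropBack t0 (fun c => PySem.Chars.isspace c) i.toNat)) := by
        rw [hslice, hstrip]
        unfold PySem.Chars.rstrip pvRstripPunct
        rw [hrs.1, hrp.1]
      rw [ht']
    · exact le_trans hrp.2 (le_trans hrs.2 hitn)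
  · rw [if_neg hI, if_neg hI]
    exact ⟨rfl, le_rfl⟩

-- the whole loop preserves it
theorem pvFold_eq (t0 : List Char)
    (hns : ∀ c, t0.head? = some c → PySem.Chars.isspace c = false) :
    ∀ (ms : List (List Char)) (n : Nat), n ≤ t0.length →
      List.foldl pvAStep (t0.take n, PySem.Chars.lower (t0.take n)) ms
          = (t0.take (List.foldl (pvBStep t0 (PySem.Chars.lower t0)) n ms),
             PySem.Chars.lower (t0.take (List.foldl (pvBStep t0 (PySem.Chars.lower t0)) n ms)))
        ∧ List.foldl (pvBStep t0 (PySem.Chars.lower t0)) n ms ≤ t0.length := by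
  intro ms
  induction ms with
  | nil => intro n hn; exact ⟨rfl, hn⟩
  | cons m ms ih =>
    intro n hn
    obtain ⟨h1, h2⟩ := pvStep_eq t0 hns m n hn
    simp only [List.foldl_cons, h1]
    exact ih _ (le_trans h2 hn)

-- ===== VERDICT (by name: the statement is the Claim_ definition above) =====
theorem hq_blob_trim_trailing_prose_py_spec : Claim_equal_hq_blob_trim_trailing_prose_py := by
  intro blob _
  unfold Spec_hq_blob_trim_trailing_prose_py
  unfold hq_blob_trim_trailing_prose_py hq_blob_trim_trailing_prose_py_alt
  set t0 := PySem.Chars.strip blob.toList with ht0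
  by_cases h : t0 = []
  · simp [h]
  · simp only [h]
    have hns : ∀ c, t0.head? = some c → PySem.Chars.isspace c = false :=
      fun c hc => pvStrip_head blob.toList c (ht0 ▸ hc)
    have := pvFold_eq t0 hns pvMarkers t0.length le_rfl
    rw [List.take_length] at this
    obtain ⟨h1, h2⟩ := this
    rw [h1, PySem.Chars.slice_eq_listSlice, PySem.List.slice_to_natCast]
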